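-- pv_equiv track=rewrite | github.com/dsoftwareinc/wiwik | forum/common/utils.py | _find_code_blocks
-- ===== SOURCE A (Python) =====
-- def _find_code_blocks(markdown_text_lines: list[str]) -> list[tuple[int, int]]:
--     res: list[tuple[int, int]] = list()
--     start = None
--     for i, line in enumerate(markdown_text_lines):
--         if "```" in line:
--             if start is None:
--                 start = i
--             else:
--                 res.append((start, i))
--                 start = None
--     return res
-- ===== SOURCE B (Python) =====
-- def _find_code_blocks(markdown_text_lines: list[str]) -> list[tuple[int, int]]:
--     idx = [i for i, line in enumerate(markdown_text_lines) if "```" in line]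
--     pairs = []
--     while len(idx) >= 2:
--         pairs.append((idx[0], idx[1]))
--         idx = idx[2:]
--     return pairs
-- ===== Notes on version B (the rewrite author's own statement) =====
-- stated objective: simpler
-- what changed: Replaces the stateful toggle (start=None/Some) of the single pass with a two-phase computation: collect all marker line indices in one comprehension, then pair them up consecutively; an unmatched trailing marker is dropped by the pairing itself.
import Mathlib
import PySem

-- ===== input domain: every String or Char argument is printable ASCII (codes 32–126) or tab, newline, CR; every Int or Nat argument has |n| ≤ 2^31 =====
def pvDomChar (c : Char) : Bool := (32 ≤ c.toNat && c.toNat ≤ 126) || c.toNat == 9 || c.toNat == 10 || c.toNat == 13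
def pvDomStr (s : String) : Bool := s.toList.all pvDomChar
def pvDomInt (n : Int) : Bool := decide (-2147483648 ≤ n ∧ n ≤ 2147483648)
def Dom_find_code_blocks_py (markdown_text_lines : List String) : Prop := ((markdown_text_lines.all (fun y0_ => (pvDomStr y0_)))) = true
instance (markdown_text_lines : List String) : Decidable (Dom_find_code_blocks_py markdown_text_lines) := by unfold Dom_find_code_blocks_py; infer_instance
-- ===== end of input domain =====

-- B replaces A's stateful open/close toggle with a two-phase computation (collect marker indices, then pair consecutively) for simplicity.


-- ===== PORT A =====
-- one step of A's loop body: toggle `start` on lines containing "```", append a pair on close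
def fcbStepA (st : List (Int × Int) × Option Int) (p : Int × String) :
    List (Int × Int) × Option Int :=
  if PySem.Str.isIn "```" p.2 then
    match st.2 with
    | none => (st.1, some p.1)
    | some s => (st.1 ++ [(s, p.1)], none)
  else st

def find_code_blocks_py (markdown_text_lines : List String) : List (Int × Int) :=
  ((PySem.List.enumerate markdown_text_lines 0).foldl fcbStepA ([], none)).1

-- ===== PORT B =====
-- the while-loop of Source B: peel two indices at a time
def fcbPairUp : List Int → List (Int × Int)
  | a :: b :: r => (a, b) :: fcbPairUp r
  | _ => []

def find_code_blocks_py_alt (markdown_text_lines : List String) : List (Int × Int) :=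
  fcbPairUp (((PySem.List.enumerate markdown_text_lines 0).filter
      (fun p => PySem.Str.isIn "```" p.2)).map (·.1))

-- ===== PRECONDITION & SPEC =====
def Spec_find_code_blocks_py (markdown_text_lines : List String) (out : List (Int × Int)) : Prop := out = find_code_blocks_py_alt markdown_text_lines
instance (markdown_text_lines : List String) (out : List (Int × Int)) : Decidable (Spec_find_code_blocks_py markdown_text_lines out) := by unfold Spec_find_code_blocks_py; infer_instance

-- ===== CLAIM (what is proved, stated in full; the proofs are below) =====
def Claim_equal_find_code_blocks_py : Prop := ∀ (markdown_text_lines : List String), Dom_find_code_blocks_py markdown_text_lines → Spec_find_code_blocks_py markdown_text_lines (find_code_blocks_py markdown_text_lines)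

-- ===== LEMMAS AND PROOFS =====
-- pairing with a pending open marker `s`
def fcbPairS (s : Int) : List Int → List (Int × Int)
  | [] => []
  | a :: r => (s, a) :: fcbPairUp r

def fcbIdxs (ps : List (Int × String)) : List Int :=
  (ps.filter (fun p => PySem.Str.isIn "```" p.2)).map (·.1)

theorem fcbPairUp_cons (a : Int) (l : List Int) : fcbPairUp (a :: l) = fcbPairS a l := by
  cases l <;> rfl

theorem fcbLoop (ps : List (Int × String)) :
    ∀ (acc : List (Int × Int)) (st : Option Int),
      (ps.foldl fcbStepA (acc, st)).1 =
        acc ++ (match st with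
                | none => fcbPairUp (fcbIdxs ps)
                | some s => fcbPairS s (fcbIdxs ps)) := by
  induction ps with
  | nil => intro acc st; cases st <;> simp [fcbIdxs, fcbPairUp, fcbPairS]
  | cons p ps ih =>
    intro acc st
    by_cases h : PySem.Chars.isIn ['`', '`', '`'] p.2.toList
    · cases st with
      | none => simp [fcbStepA, PySem.Str.isIn, h, ih, fcbIdxs, fcbPairUp_cons, fcbPairS]
      | some s => simp [fcbStepA, PySem.Str.isIn, h, ih, fcbIdxs, fcbPairS]
    · cases st <;> simp [fcbStepA, PySem.Str.isIn, h, ih, fcbIdxs]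

-- ===== VERDICT (by name: the statement is the Claim_ definition above) =====
theorem find_code_blocks_py_spec : Claim_equal_find_code_blocks_py := by
  intro xs _
  show _ = _
  simp [find_code_blocks_py, find_code_blocks_py_alt, fcbLoop, fcbIdxs]
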